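-- pv_equiv track=rewrite | github.com/EjayNg-AI/llm_training | scripts/tokenizer_bpe/export.py | _build_special_tokens_map
-- ===== SOURCE A (Python) =====
-- def _build_special_tokens_map(tokens: list[str]) -> dict[str, str]:
--     def first_present(candidates: list[str], fallback: str | None = None) -> str | None:
--         for candidate in candidates:
--             if candidate in tokens:
--                 return candidate
--         return fallback
--
--     mapping: dict[str, str] = {}
--     bos_token = first_present(["<bos>", "<s>", "<|endoftext|>"], tokens[0] if tokens else None)
--     eos_token = first_present(["<eos>", "</s>", "<|endoftext|>"], tokens[0] if tokens else None)
--     unk_token = first_present(["<unk>", "<|endoftext|>"], tokens[0] if tokens else None)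
--     pad_token = first_present(["<pad>", "<|pad|>"], tokens[-1] if tokens else None)
--
--     if bos_token is not None:
--         mapping["bos_token"] = bos_token
--     if eos_token is not None:
--         mapping["eos_token"] = eos_token
--     if unk_token is not None:
--         mapping["unk_token"] = unk_token
--     if pad_token is not None:
--         mapping["pad_token"] = pad_token
--     return mapping
-- ===== SOURCE B (Python) =====
-- def _build_special_tokens_map(tokens: list[str]) -> dict[str, str]:
--     BOS = ["<bos>", "<s>", "<|endoftext|>"]
--     EOS = ["<eos>", "</s>", "<|endoftext|>"]
--     UNK = ["<unk>", "<|endoftext|>"]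
--     PAD = ["<pad>", "<|pad|>"]
--
--     def rank(cands, tok, cur):
--         try:
--             i = cands.index(tok)
--         except ValueError:
--             return cur
--         return i if i < cur else cur
--
--     b, e, u, p = len(BOS), len(EOS), len(UNK), len(PAD)
--     for tok in tokens:
--         b = rank(BOS, tok, b)
--         e = rank(EOS, tok, e)
--         u = rank(UNK, tok, u)
--         p = rank(PAD, tok, p)
--
--     if not tokens:
--         return {}
--     return {
--         "bos_token": BOS[b] if b < len(BOS) else tokens[0],
--         "eos_token": EOS[e] if e < len(EOS) else tokens[0],
--         "unk_token": UNK[u] if u < len(UNK) else tokens[0],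
--         "pad_token": PAD[p] if p < len(PAD) else tokens[-1],
--     }
-- ===== Notes on version B (the rewrite author's own statement) =====
-- stated objective: alternative
-- what changed: Inverts the traversal: instead of scanning each key's candidate list and testing membership in tokens, B makes one pass over the tokens maintaining the minimal candidate rank seen per key, then decodes each best rank back to a candidate (or the first/last-token fallback).
import Mathlib
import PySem

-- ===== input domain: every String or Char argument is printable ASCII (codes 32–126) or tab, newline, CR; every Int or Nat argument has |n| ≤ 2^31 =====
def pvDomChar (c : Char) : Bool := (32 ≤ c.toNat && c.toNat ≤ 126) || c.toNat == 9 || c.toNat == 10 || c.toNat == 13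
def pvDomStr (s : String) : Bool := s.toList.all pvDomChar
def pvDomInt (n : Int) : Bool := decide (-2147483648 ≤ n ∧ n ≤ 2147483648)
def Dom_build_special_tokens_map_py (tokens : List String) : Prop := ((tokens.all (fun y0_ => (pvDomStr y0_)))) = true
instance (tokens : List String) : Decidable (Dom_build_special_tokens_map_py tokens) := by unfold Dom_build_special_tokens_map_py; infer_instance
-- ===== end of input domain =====

-- B inverts the traversal: one pass over the tokens maintaining the minimal candidate
-- rank per key, decoded at the end, instead of A's per-key candidate scans (alternative).

-- ===== PORT A =====
def firstPresentA (tokens : List String) (candidates : List String) (fallback : Option String) : Option String :=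
  match candidates with
  | [] => fallback
  | c :: rest => if c ∈ tokens then some c else firstPresentA tokens rest fallback

def build_special_tokens_map_py (tokens : List String) : List (String × String) :=
  let bos := firstPresentA tokens ["<bos>", "<s>", "<|endoftext|>"]
      (if tokens.isEmpty then none else PySem.List.pyGet? tokens 0)
  let eos := firstPresentA tokens ["<eos>", "</s>", "<|endoftext|>"]
      (if tokens.isEmpty then none else PySem.List.pyGet? tokens 0)
  let unk := firstPresentA tokens ["<unk>", "<|endoftext|>"]
      (if tokens.isEmpty then none else PySem.List.pyGet? tokens 0)
  let pad := firstPresentA tokens ["<pad>", "<|pad|>"]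
      (if tokens.isEmpty then none else PySem.List.pyGet? tokens (-1))
  let m0 : PySem.Dict String String := PySem.Dict.empty
  let m1 := match bos with | some v => m0.insert "bos_token" v | none => m0
  let m2 := match eos with | some v => m1.insert "eos_token" v | none => m1
  let m3 := match unk with | some v => m2.insert "unk_token" v | none => m2
  let m4 := match pad with | some v => m3.insert "pad_token" v | none => m3
  m4.items

-- ===== PORT B =====
-- rank(cands, tok, cur) from Source B: cands.index(tok) if present and smaller than cur, else cur
def rankB (cands : List String) (tok : String) (cur : Nat) : Nat :=
  match cands.idxOf? tok with
  | none => cur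
  | some i => if i < cur then i else cur

def bosC : List String := ["<bos>", "<s>", "<|endoftext|>"]
def eosC : List String := ["<eos>", "</s>", "<|endoftext|>"]
def unkC : List String := ["<unk>", "<|endoftext|>"]
def padC : List String := ["<pad>", "<|pad|>"]

def build_special_tokens_map_py_alt (tokens : List String) : List (String × String) :=
  let st := tokens.foldl
    (fun (s : Nat × Nat × Nat × Nat) tok =>
      (rankB bosC tok s.1, rankB eosC tok s.2.1, rankB unkC tok s.2.2.1, rankB padC tok s.2.2.2))
    (bosC.length, eosC.length, unkC.length, padC.length)
  if tokens.isEmpty then []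
  else
    [("bos_token", if st.1 < bosC.length then bosC.getD st.1 "" else tokens.headD ""),
     ("eos_token", if st.2.1 < eosC.length then eosC.getD st.2.1 "" else tokens.headD ""),
     ("unk_token", if st.2.2.1 < unkC.length then unkC.getD st.2.2.1 "" else tokens.headD ""),
     ("pad_token", if st.2.2.2 < padC.length then padC.getD st.2.2.2 "" else tokens.getLastD "")]

-- ===== PRECONDITION & SPEC =====
def Spec_build_special_tokens_map_py (tokens : List String) (out : List (String × String)) : Prop := out = build_special_tokens_map_py_alt tokens
instance (tokens : List String) (out : List (String × String)) : Decidable (Spec_build_special_tokens_map_py tokens out) := by unfold Spec_build_special_tokens_map_py; infer_instance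

-- ===== CLAIM (what is proved, stated in full; the proofs are below) =====
def Claim_equal_build_special_tokens_map_py : Prop := ∀ (tokens : List String), Dom_build_special_tokens_map_py tokens → Spec_build_special_tokens_map_py tokens (build_special_tokens_map_py tokens)

-- ===== LEMMAS AND PROOFS =====

-- rank of a single token in a candidate list: first index, or cands.length if absent
def gRank (cands : List String) (t : String) : Nat := (cands.idxOf? t).getD cands.length

-- minimal rank over a token list, exactly as B's fold computes each component
def bestRank (cands : List String) (ts : List String) : Nat :=
  ts.foldl (fun c t => rankB cands t c) cands.length

lemma idxOf?_lt_length {cands : List String} {t : String} {i : Nat}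
    (h : cands.idxOf? t = some i) : i < cands.length :=
  (List.findIdx?_eq_some_iff_findIdx_eq.mp (by simpa [List.idxOf?] using h)).1

lemma rankB_eq_min (cands : List String) (t : String) (cur : Nat) (h : cur ≤ cands.length) :
    rankB cands t cur = min cur (gRank cands t) := by
  unfold rankB gRank
  cases hidx : cands.idxOf? t with
  | none => simp only [Option.getD]; omega
  | some i =>
    have hi := idxOf?_lt_length hidx
    simp only [Option.getD]
    split_ifs <;> omega

lemma gRank_le (cands : List String) (t : String) : gRank cands t ≤ cands.length := by
  unfold gRank
  cases hidx : cands.idxOf? t with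
  | none => simp
  | some i => have := idxOf?_lt_length hidx; simp; omega

lemma foldl_rank (cands : List String) (ts : List String) (cur : Nat) (h : cur ≤ cands.length) :
    ts.foldl (fun c t => rankB cands t c) cur = min cur (bestRank cands ts) := by
  induction ts generalizing cur with
  | nil => simp only [List.foldl_nil, bestRank]; omega
  | cons t ts ih =>
    have h1 : rankB cands t cur ≤ cands.length := by
      rw [rankB_eq_min cands t cur h]; have := gRank_le cands t; omega
    have h2 : rankB cands t cands.length ≤ cands.length := by
      rw [rankB_eq_min cands t cands.length (le_refl _)]; have := gRank_le cands t; omega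
    show List.foldl _ (rankB cands t cur) ts = _
    rw [ih _ h1]
    have hb : bestRank cands (t :: ts) = min (rankB cands t cands.length) (bestRank cands ts) := by
      show List.foldl _ (rankB cands t cands.length) ts = _
      rw [ih _ h2]
    rw [hb, rankB_eq_min cands t cur h, rankB_eq_min cands t cands.length (le_refl _)]
    have := gRank_le cands t
    omega

lemma bestRank_cons (cands : List String) (t : String) (ts : List String) :
    bestRank cands (t :: ts) = min (gRank cands t) (bestRank cands ts) := by
  show List.foldl _ (rankB cands t cands.length) ts = _
  rw [foldl_rank cands ts _ (by rw [rankB_eq_min _ _ _ (le_refl _)]; have := gRank_le cands t; omega),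
      rankB_eq_min cands t cands.length (le_refl _)]
  have := gRank_le cands t
  omega

lemma bestRank_le (cands ts : List String) : bestRank cands ts ≤ cands.length := by
  induction ts with
  | nil => simp [bestRank]
  | cons t ts ih => rw [bestRank_cons]; omega

lemma gRank_cons (c : String) (cs : List String) (t : String) :
    gRank (c :: cs) t = if t = c then 0 else gRank cs t + 1 := by
  unfold gRank
  by_cases hc : c = t
  · simp [List.idxOf?, List.findIdx?_cons, hc]
  · have hne : (c == t) = false := by simp [hc]
    have hnt : ¬ (t = c) := fun h => hc h.symm
    simp only [List.idxOf?, List.findIdx?_cons, hne, if_neg hnt]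
    cases hidx : List.findIdx? (fun x => x == t) cs with
    | none => simp
    | some j => simp

lemma bestRank_cons_cands (c : String) (cs : List String) (ts : List String) :
    bestRank (c :: cs) ts = if c ∈ ts then 0 else bestRank cs ts + 1 := by
  induction ts with
  | nil => simp [bestRank]
  | cons t ts ih =>
    rw [bestRank_cons, bestRank_cons, ih, gRank_cons]
    by_cases ht : t = c
    · subst ht
      have := bestRank_le cs ts
      simp only [List.mem_cons, true_or, if_pos]
      split_ifs <;> omega
    · have hmem : (c ∈ t :: ts) ↔ (c ∈ ts) := by
        simp [List.mem_cons]; intro h; exact absurd h.symm ht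
      rw [if_neg ht]
      by_cases hm : c ∈ ts
      · rw [if_pos hm, if_pos (hmem.mpr hm)]; omega
      · rw [if_neg hm, if_neg (fun h => hm (hmem.mp h))]
        have := gRank_le cs t
        have := bestRank_le cs ts
        omega

lemma bestRank_nil_cands (ts : List String) : bestRank [] ts = 0 := by
  induction ts with
  | nil => simp [bestRank]
  | cons t ts ih => rw [bestRank_cons, ih]; simp [gRank, List.idxOf?]

lemma firstPresentA_eq (ts : List String) (cands : List String) (fb : Option String) :
    firstPresentA ts cands fb =
      if h : bestRank cands ts < cands.length
      then some (cands.get ⟨bestRank cands ts, h⟩)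
      else fb := by
  induction cands with
  | nil => simp [firstPresentA, bestRank_nil_cands]
  | cons c cs ih =>
    rw [show firstPresentA ts (c :: cs) fb = if c ∈ ts then some c else firstPresentA ts cs fb from rfl]
    by_cases hm : c ∈ ts
    · simp [hm, bestRank_cons_cands]
    · rw [if_neg hm, ih]
      rw [bestRank_cons_cands, if_neg hm]
      by_cases h : bestRank cs ts < cs.length
      · rw [dif_pos h, dif_pos (by simp; omega)]
        simp
      · rw [dif_neg h, dif_neg (by simp; omega)]

lemma value_eq (ts : List String) (cands : List String) (x : String) :
    firstPresentA ts cands (some x) =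
      some (if bestRank cands ts < cands.length then cands.getD (bestRank cands ts) "" else x) := by
  rw [firstPresentA_eq]
  by_cases h : bestRank cands ts < cands.length
  · rw [dif_pos h, if_pos h]
    congr 1
    simp [List.getD_eq_getElem?_getD, List.getElem?_eq_getElem h]
  · rw [dif_neg h, if_neg h]

lemma fold_tuple (ts : List String) (a b c d : Nat) :
    ts.foldl
      (fun (s : Nat × Nat × Nat × Nat) tok =>
        (rankB bosC tok s.1, rankB eosC tok s.2.1, rankB unkC tok s.2.2.1, rankB padC tok s.2.2.2))
      (a, b, c, d) =
      (ts.foldl (fun x t => rankB bosC t x) a,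
       ts.foldl (fun x t => rankB eosC t x) b,
       ts.foldl (fun x t => rankB unkC t x) c,
       ts.foldl (fun x t => rankB padC t x) d) := by
  induction ts generalizing a b c d with
  | nil => rfl
  | cons t ts ih => simp only [List.foldl_cons]; rw [ih]

-- ===== VERDICT (by name: the statement is the Claim_ definition above) =====
theorem build_special_tokens_map_py_spec : Claim_equal_build_special_tokens_map_py := by
  intro tokens _
  unfold Spec_build_special_tokens_map_py
  cases tokens with
  | nil => decide
  | cons t ts =>
    have hne : (t :: ts) ≠ [] := by simp
    unfold build_special_tokens_map_py build_special_tokens_map_py_alt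
    rw [fold_tuple]
    simp only [List.isEmpty_cons, Bool.false_eq_true, if_false]
    rw [show (PySem.List.pyGet? (t :: ts) 0) = some t from PySem.List.pyGet?_zero_cons t ts]
    rw [PySem.List.pyGet?_neg_one, List.getLast?_eq_some_getLast hne]
    rw [show (t :: ts).foldl (fun x tok => rankB bosC tok x) bosC.length = bestRank bosC (t :: ts) from rfl,
        show (t :: ts).foldl (fun x tok => rankB eosC tok x) eosC.length = bestRank eosC (t :: ts) from rfl,
        show (t :: ts).foldl (fun x tok => rankB unkC tok x) unkC.length = bestRank unkC (t :: ts) from rfl,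
        show (t :: ts).foldl (fun x tok => rankB padC tok x) padC.length = bestRank padC (t :: ts) from rfl]
    rw [show (["<bos>", "<s>", "<|endoftext|>"] : List String) = bosC from rfl,
        show (["<eos>", "</s>", "<|endoftext|>"] : List String) = eosC from rfl,
        show (["<unk>", "<|endoftext|>"] : List String) = unkC from rfl,
        show (["<pad>", "<|pad|>"] : List String) = padC from rfl]
    rw [value_eq, value_eq, value_eq, value_eq]
    simp [PySem.Dict.insert, PySem.Dict.empty,
          List.headD, List.getLastD_eq_getLast?, List.getLast?_eq_some_getLast hne]
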